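-- pv_equiv track=rewrite | github.com/precimed/genomatch | src/genomatch/vtable_utils.py | shard_local_provenance
-- ===== SOURCE A (Python) =====
-- from typing import Dict, Iterable, List, Optional, Sequence, Tuple
--
-- def shard_local_provenance(shards: Sequence[str]) -> List[Tuple[str, int]]:
--     counts: Dict[str, int] = {}
--     out: List[Tuple[str, int]] = []
--     for shard in shards:
--         if not shard:
--             raise ValueError("source shard is missing")
--         index = counts.get(shard, 0)
--         out.append((shard, index))
--         counts[shard] = index + 1
--     return out
-- ===== SOURCE B (Python) =====
-- from typing import Dict, List, Sequence, Tuple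
--
-- def shard_local_provenance(shards: Sequence[str]) -> List[Tuple[str, int]]:
--     for shard in shards:
--         if not shard:
--             raise ValueError("source shard is missing")
--     positions: Dict[str, List[int]] = {}
--     for i, shard in enumerate(shards):
--         positions.setdefault(shard, []).append(i)
--     out: List[Tuple[str, int]] = [None] * len(shards)  # type: ignore[list-item]
--     for shard, idxs in positions.items():
--         for k, i in enumerate(idxs):
--             out[i] = (shard, k)
--     return out
-- ===== Notes on version B (the rewrite author's own statement) =====
-- stated objective: alternative
-- what changed: B replaces A's single pass with a running per-shard counter by a three-stage group-and-scatter: validate all shards up front, group the positions of each shard value into a dict of index lists, then scatter (shard, rank-within-its-group) into a pre-allocated output array.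
import Mathlib
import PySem

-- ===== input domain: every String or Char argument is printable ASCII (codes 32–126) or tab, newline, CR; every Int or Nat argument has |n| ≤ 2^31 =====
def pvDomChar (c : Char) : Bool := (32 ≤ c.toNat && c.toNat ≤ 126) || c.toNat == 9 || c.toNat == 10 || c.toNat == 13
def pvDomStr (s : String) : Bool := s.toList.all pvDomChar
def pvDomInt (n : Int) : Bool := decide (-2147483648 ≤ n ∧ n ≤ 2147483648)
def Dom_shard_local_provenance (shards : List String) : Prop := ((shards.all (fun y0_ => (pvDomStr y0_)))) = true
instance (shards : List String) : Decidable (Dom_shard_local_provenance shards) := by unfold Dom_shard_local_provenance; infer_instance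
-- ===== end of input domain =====

-- B replaces A's single counter-dict pass by a three-stage group-and-scatter (objective: alternative).

-- ===== PORT A =====
-- A's for-loop; 'if not shard: raise ValueError' is the early exit (outside Pre_)
def shardGoA (counts : PySem.Dict String Int) (out : List (String × Int)) :
    List String → List (String × Int)
  | [] => out
  | shard :: rest =>
    if shard = "" then out
    else
      let index := counts.getD shard 0
      shardGoA (counts.insert shard (index + 1)) (out ++ [(shard, index)]) rest

def shard_local_provenance (shards : List String) : List (String × Int) :=
  shardGoA PySem.Dict.empty [] shards

-- ===== PORT B =====
def shard_local_provenance_alt (shards : List String) : List (String × Int) :=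
  -- validation pass: 'for shard in shards: if not shard: raise ValueError' (raising is outside Pre_)
  if shards.any (fun s => s = "") then []
  else
    -- 'positions.setdefault(shard, []).append(i)' over enumerate(shards)
    let positions : PySem.Dict String (List Int) :=
      (PySem.List.enumerate shards 0).foldl
        (fun d p => d.modify p.2 [] (fun l => l ++ [p.1])) PySem.Dict.empty
    -- 'out = [None] * len(shards)'
    let out0 : List (Option (String × Int)) := List.replicate shards.length none
    -- 'for shard, idxs in positions.items(): for k, i in enumerate(idxs): out[i] = (shard, k)'
    let filled : List (Option (String × Int)) :=
      positions.items.foldl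
        (fun o p =>
          (PySem.List.enumerate p.2 0).foldl
            (fun o' q => PySem.List.pySetD o' q.2 (some (p.1, q.1))) o)
        out0
    -- every slot was written, so the 'None' default is never taken ('return out')
    filled.map (fun o => o.getD ("", 0))

-- ===== PRECONDITION & SPEC =====
-- Pre_ excludes inputs containing an empty shard, on which A raises ValueError
def Pre_shard_local_provenance (shards : List String) : Prop := "" ∉ shards
instance (shards : List String) : Decidable (Pre_shard_local_provenance shards) := by
  unfold Pre_shard_local_provenance; infer_instance

def pvWitness_shard_local_provenance : List String := ["a", "b", "a"]

def Spec_shard_local_provenance (shards : List String) (out : List (String × Int)) : Prop :=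
  out = shard_local_provenance_alt shards
instance (shards : List String) (out : List (String × Int)) :
    Decidable (Spec_shard_local_provenance shards out) := by
  unfold Spec_shard_local_provenance; infer_instance

-- ===== CLAIM (what is proved, stated in full; the proofs are below) =====
def Claim_equal_shard_local_provenance : Prop := ∀ (shards : List String),
  Dom_shard_local_provenance shards → Pre_shard_local_provenance shards →
  Spec_shard_local_provenance shards (shard_local_provenance shards)

-- ===== LEMMAS AND PROOFS =====

-- the common reference value: (shard, number of equal shards in the prefix seen so far)
def specFrom (pref : List String) : List String → List (String × Int)
  | [] => []
  | s :: r => (s, (pref.count s : Int)) :: specFrom (pref ++ [s]) r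


def occ (shards : List String) (s : String) : List Int :=
  ((PySem.List.enumerate shards 0).filter (fun p => p.2 == s)).map (fun p => p.1)

theorem pos_getD (shards : List String) (s : String) :
    ((PySem.List.enumerate shards 0).foldl
        (fun d p => d.modify p.2 [] (fun l => l ++ [p.1])) PySem.Dict.empty).getD s []
      = occ shards s := by
  have h1 : ((PySem.List.enumerate shards 0).map Prod.swap).foldl
      (fun d (q : String × Int) => d.modify q.1 [] (fun l => l ++ [q.2])) PySem.Dict.empty
      = (PySem.List.enumerate shards 0).foldl
        (fun d p => d.modify p.2 [] (fun l => l ++ [p.1])) PySem.Dict.empty := by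
    rw [List.foldl_map]; rfl
  rw [← h1, PySem.Dict.getD_foldl_modify_append]
  simp [occ, PySem.Dict.getD_empty, List.filter_map, List.map_map, Function.comp_def]

theorem pos_keys (shards : List String) :
    ((PySem.List.enumerate shards 0).foldl
        (fun d p => d.modify p.2 [] (fun l => l ++ [p.1])) PySem.Dict.empty).keys
      = PySem.Set.ofList shards := by
  have h1 : ((PySem.List.enumerate shards 0).map Prod.swap).foldl
      (fun d (q : String × Int) => d.modify q.1 [] (fun l => l ++ [q.2])) PySem.Dict.empty
      = (PySem.List.enumerate shards 0).foldl
        (fun d p => d.modify p.2 [] (fun l => l ++ [p.1])) PySem.Dict.empty := by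
    rw [List.foldl_map]; rfl
  rw [← h1,
    PySem.Dict.keys_foldl_modify_key ((PySem.List.enumerate shards 0).map Prod.swap)
      (fun q => q.1) [] (fun _ q => fun l => l ++ [q.2]) PySem.Dict.empty]
  have h2 : (((PySem.List.enumerate shards 0).map Prod.swap).map (fun q => q.1)) = shards := by
    simp only [List.map_map]
    simp [Function.comp_def, PySem.List.map_snd_enumerate shards 0]
  rw [h2]
  rfl

theorem mem_occ_iff (shards : List String) (s : String) (x : Int) :
    x ∈ occ shards s ↔ ∃ k, ∃ _ : k < shards.length, x = (k : Int) ∧ shards[k] = s := by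
  simp only [occ, List.mem_map, List.mem_filter, PySem.List.mem_enumerate_iff]
  constructor
  · rintro ⟨p, ⟨⟨k, hk, rfl⟩, hps⟩, rfl⟩
    exact ⟨k, hk, by simp, by simpa using hps⟩
  · rintro ⟨k, hk, rfl, hs⟩
    exact ⟨((k : Int), shards[k]), ⟨⟨k, hk, by simp⟩, by simp [hs]⟩, rfl⟩

theorem occ_nodup (shards : List String) (s : String) : (occ shards s).Nodup := by
  have h := PySem.List.pairwise_lt_enumerate shards 0
  have h2 : ((PySem.List.enumerate shards 0).filter (fun p => p.2 == s)).Pairwise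
      (fun p q => p.1 < q.1) := h.filter _
  have h3 : (occ shards s).Pairwise (fun a b => a < b) := by
    unfold occ; exact List.pairwise_map.mpr h2
  exact h3.imp (fun hlt => ne_of_lt hlt)

theorem occ_getElem? (shards : List String) : ∀ (st : Int) (j : Nat) (s : String),
    shards[j]? = some s →
    (((PySem.List.enumerate shards st).filter (fun p => p.2 == s)).map (fun p => p.1))[
      (shards.take j).count s]? = some (st + (j : Int)) := by
  induction shards with
  | nil => intro st j s hs; simp at hs
  | cons x xs ih =>
    intro st j s hs
    rw [PySem.List.enumerate_cons]
    cases j with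
    | zero =>
      simp only [List.getElem?_cons_zero, Option.some_inj] at hs
      subst hs
      simp
    | succ j =>
      simp only [List.getElem?_cons_succ] at hs
      by_cases hx : x = s
      · subst hx
        simp only [List.take_succ_cons, List.count_cons, List.filter_cons, beq_self_eq_true,
          if_true, List.map_cons]
        have := ih (st + 1) j x hs
        rw [show (List.count x (List.take j xs) + 1) = Nat.succ (List.count x (List.take j xs)) from rfl]
        rw [List.getElem?_cons_succ, this]
        congr 1
        push_cast
        ring
      · have hbx : (x == s) = false := by simp [hx]
        simp only [List.take_succ_cons, List.count_cons, List.filter_cons, hbx]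
        have := ih (st + 1) j s hs
        simp only [if_false, Bool.false_eq_true, add_zero]
        rw [this]
        congr 1
        push_cast
        ring


theorem pyGetD_pySetD_ne {α : Type} (xs : List α) (i : Int) (j : Nat) (v d : α)
    (hi : 0 ≤ i) (hne : i ≠ (j : Int)) :
    PySem.List.pyGetD (PySem.List.pySetD xs i v) (j : Int) d = PySem.List.pyGetD xs (j : Int) d := by
  rw [PySem.List.pySetD_of_nonneg xs v hi, PySem.List.pyGetD_natCast, PySem.List.pyGetD_natCast]
  have hip : i.toNat ≠ j := by omega
  rw [List.getD_eq_getElem?_getD, List.getD_eq_getElem?_getD, List.getElem?_set_ne hip]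

theorem pyGetD_pySetD_self {α : Type} (xs : List α) (j : Nat) (v d : α) (hj : j < xs.length) :
    PySem.List.pyGetD (PySem.List.pySetD xs (j : Int) v) (j : Int) d = v := by
  rw [PySem.List.pySetD_of_nonneg xs v (by positivity), PySem.List.pyGetD_natCast]
  simp only [Int.toNat_natCast]
  rw [List.getD_eq_getElem?_getD, List.getElem?_set_self (by simpa using hj)]
  simp

theorem innerLen (s : String) (idxs : List Int) :
    ∀ (st : Int) (out : List (Option (String × Int))),
    ((PySem.List.enumerate idxs st).foldl
      (fun o' q => PySem.List.pySetD o' q.2 (some (s, q.1))) out).length = out.length := by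
  induction idxs with
  | nil => intro st out; simp [PySem.List.enumerate]
  | cons i rest ih =>
    intro st out
    rw [PySem.List.enumerate_cons]
    simp only [List.foldl_cons]
    rw [ih (st + 1)]
    exact PySem.List.length_pySetD out i (some (s, st))

theorem innerPres (s : String) (idxs : List Int) :
    ∀ (st : Int) (out : List (Option (String × Int))) (j : Nat),
    (∀ i ∈ idxs, 0 ≤ i) → ((j : Int) ∉ idxs) →
    PySem.List.pyGetD
      ((PySem.List.enumerate idxs st).foldl
        (fun o' q => PySem.List.pySetD o' q.2 (some (s, q.1))) out) (j : Int) none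
      = PySem.List.pyGetD out (j : Int) none := by
  induction idxs with
  | nil => intro st out j _ _; simp [PySem.List.enumerate]
  | cons i rest ih =>
    intro st out j h0 hj
    rw [PySem.List.enumerate_cons]
    simp only [List.foldl_cons]
    rw [ih (st + 1) _ j (fun i' hi' => h0 i' (by simp [hi'])) (fun h => hj (by simp [h]))]
    exact pyGetD_pySetD_ne out i j _ none (h0 i (by simp)) (fun h => hj (by simp [h]))

theorem innerHit (s : String) (idxs : List Int) :
    ∀ (st : Int) (out : List (Option (String × Int))) (j k : Nat),
    idxs.Nodup → (∀ i ∈ idxs, 0 ≤ i ∧ i < (out.length : Int)) →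
    idxs[k]? = some ((j : Nat) : Int) →
    PySem.List.pyGetD
      ((PySem.List.enumerate idxs st).foldl
        (fun o' q => PySem.List.pySetD o' q.2 (some (s, q.1))) out) (j : Int) none
      = some (s, st + (k : Int)) := by
  induction idxs with
  | nil => intro st out j k _ _ hk; simp at hk
  | cons i rest ih =>
    intro st out j k hnd hb hk
    rw [PySem.List.enumerate_cons]
    simp only [List.foldl_cons]
    by_cases hij : i = (j : Int)
    · have hir : i ∉ rest := (List.nodup_cons.mp hnd).1
      have hjr : ((j : Nat) : Int) ∉ rest := by rw [← hij]; exact hir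
      have hk0 : k = 0 := by
        cases k with
        | zero => rfl
        | succ k' =>
          exfalso
          exact hjr (List.mem_of_getElem? (by simpa using hk))
      subst hk0
      rw [innerPres s rest (st + 1) _ j (fun i' hi' => (hb i' (by simp [hi'])).1) hjr]
      rw [hij]
      have hlen : j < out.length := by
        have := (hb i (by simp)).2
        omega
      rw [pyGetD_pySetD_self out j _ none hlen]
      simp
    · cases k with
      | zero =>
        exfalso; apply hij; simpa using hk
      | succ k' =>
        have hk' : rest[k']? = some ((j : Nat) : Int) := by simpa using hk
        have := ih (st + 1) (PySem.List.pySetD out i (some (s, st))) j k'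
          (List.nodup_cons.mp hnd).2
          (by
            intro i' hi'
            have := hb i' (by simp [hi'])
            simpa [PySem.List.length_pySetD] using this)
          hk'
        rw [this]
        congr 2
        push_cast
        ring

theorem outerLen (its : List (String × List Int)) :
    ∀ (out : List (Option (String × Int))),
    (its.foldl
      (fun o p => (PySem.List.enumerate p.2 0).foldl
        (fun o' q => PySem.List.pySetD o' q.2 (some (p.1, q.1))) o) out).length = out.length := by
  induction its with
  | nil => intro out; simp
  | cons p rest ih =>
    intro out
    simp only [List.foldl_cons]
    rw [ih, innerLen]

theorem outerPres (j : Nat) (its : List (String × List Int)) :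
    ∀ (out : List (Option (String × Int))),
    (∀ p ∈ its, ((j : Int) ∉ p.2) ∧ ∀ i ∈ p.2, 0 ≤ i) →
    PySem.List.pyGetD
      (its.foldl
        (fun o p => (PySem.List.enumerate p.2 0).foldl
          (fun o' q => PySem.List.pySetD o' q.2 (some (p.1, q.1))) o) out) (j : Int) none
      = PySem.List.pyGetD out (j : Int) none := by
  induction its with
  | nil => intro out _; simp
  | cons p rest ih =>
    intro out h
    simp only [List.foldl_cons]
    rw [ih _ (fun p' hp' => h p' (by simp [hp']))]
    exact innerPres p.1 p.2 0 out j (h p (by simp)).2 (h p (by simp)).1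

theorem scatterGet (shards : List String) (j : Nat) (hj : j < shards.length)
    (its : List (String × List Int)) :
    ∀ (out : List (Option (String × Int))),
    (its.map Prod.fst).Nodup →
    (∀ p ∈ its, p.2 = occ shards p.1) →
    out.length = shards.length →
    PySem.List.pyGetD
      (its.foldl
        (fun o p => (PySem.List.enumerate p.2 0).foldl
          (fun o' q => PySem.List.pySetD o' q.2 (some (p.1, q.1))) o) out) (j : Int) none
      = if shards[j] ∈ its.map Prod.fst
        then some (shards[j], (((shards.take j).count shards[j] : Nat) : Int))
        else PySem.List.pyGetD out (j : Int) none := by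
  induction its with
  | nil => intro out _ _ _; simp
  | cons p rest ih =>
    intro out hnd hocc hlen
    have hocc_p : p.2 = occ shards p.1 := hocc p (by simp)
    have hbounds : ∀ i ∈ p.2, 0 ≤ i ∧ i < ((out.length : Nat) : Int) := by
      intro i hi
      rw [hocc_p] at hi
      obtain ⟨k, hk, rfl, _⟩ := (mem_occ_iff shards p.1 i).mp hi
      constructor
      · positivity
      · rw [hlen]; exact_mod_cast hk
    simp only [List.foldl_cons, List.map_cons]
    by_cases hp : p.1 = shards[j]
    · -- this item writes position j (at rank = prefix count); later items never touch j
      have hrest_pres : ∀ p' ∈ rest, ((j : Int) ∉ p'.2) ∧ ∀ i ∈ p'.2, 0 ≤ i := by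
        intro p' hp'
        constructor
        · intro hmem
          rw [hocc p' (by simp [hp'])] at hmem
          obtain ⟨k, hk, hkj, hks⟩ := (mem_occ_iff shards p'.1 _).mp hmem
          have hkj' : k = j := by exact_mod_cast hkj.symm
          have hne : p.1 ≠ p'.1 := by
            have hh := (List.nodup_cons.mp hnd).1
            intro he
            exact hh (by rw [he]; exact List.mem_map_of_mem hp')
          apply hne
          subst hkj'
          rw [hp]
          exact hks
        · intro i hi
          rw [hocc p' (by simp [hp'])] at hi
          obtain ⟨k, _, rfl, _⟩ := (mem_occ_iff shards p'.1 i).mp hi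
          positivity
      rw [outerPres j rest _ hrest_pres]
      have hidx : p.2[(shards.take j).count shards[j]]? = some ((j : Nat) : Int) := by
        rw [hocc_p, hp]
        have := occ_getElem? shards 0 j shards[j] (List.getElem?_eq_getElem hj)
        simpa [occ] using this
      rw [innerHit p.1 p.2 0 out j ((shards.take j).count shards[j])
        (by rw [hocc_p]; exact occ_nodup shards p.1) hbounds hidx]
      simp [hp]
    · -- this item never touches position j; recurse
      have hjnot : ((j : Int)) ∉ p.2 := by
        intro hmem
        rw [hocc_p] at hmem
        obtain ⟨k, hk, hkj, hks⟩ := (mem_occ_iff shards p.1 _).mp hmem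
        have hkj' : k = j := by exact_mod_cast hkj.symm
        subst hkj'
        exact hp (by rw [← hks])
      rw [ih _ (List.nodup_cons.mp hnd).2 (fun p' hp' => hocc p' (by simp [hp']))
        (by rw [innerLen]; exact hlen)]
      by_cases hm : shards[j] ∈ rest.map Prod.fst
      · simp [hm]
      · have hps : shards[j] ≠ p.1 := by intro h; exact hp h.symm
        rw [innerPres p.1 p.2 0 out j (fun i hi => (hbounds i hi).1) hjnot]
        simp [hm, hps]


theorem shardGoA_eq (rest : List String) :
    ∀ (pref : List String) (counts : PySem.Dict String Int) (out : List (String × Int)),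
    (∀ s ∈ rest, s ≠ "") →
    (∀ t, counts.getD t 0 = (pref.count t : Int)) →
    shardGoA counts out rest = out ++ specFrom pref rest := by
  induction rest with
  | nil => intro pref counts out _ _; simp [shardGoA, specFrom]
  | cons shard rest ih =>
    intro pref counts out hne hinv
    have hs : shard ≠ "" := hne shard (by simp)
    simp only [shardGoA, hs, if_false, specFrom]
    rw [ih (pref ++ [shard]) _ _ (fun s hs' => hne s (by simp [hs'])) ?_]
    · simp [hinv shard]
    · intro t
      rw [PySem.Dict.getD_insert]
      by_cases ht : t = shard
      · subst ht; simp [hinv t, List.count_append]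
      · have ht' : shard ≠ t := fun h => ht h.symm
        simp [ht, hinv t, List.count_append, ht']

theorem specFrom_getElem? (rest : List String) :
    ∀ (pref : List String) (j : Nat),
    (specFrom pref rest)[j]? =
      rest[j]?.map (fun s => (s, (((pref ++ rest.take j).count s : Nat) : Int))) := by
  induction rest with
  | nil => intro pref j; simp [specFrom]
  | cons s r ih =>
    intro pref j
    cases j with
    | zero => simp [specFrom]
    | succ j =>
      simp only [specFrom, List.getElem?_cons_succ, List.take_succ_cons]
      rw [ih (pref ++ [s]) j]
      simp [List.append_assoc]


theorem alt_eq (shards : List String) (hpre : "" ∉ shards) :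
    shard_local_provenance_alt shards = specFrom [] shards := by
  have hany : (shards.any fun s => decide (s = "")) = false := by
    rw [List.any_eq_false]
    intro x hx
    simp only [decide_eq_true_eq]
    intro h; exact hpre (h ▸ hx)
  unfold shard_local_provenance_alt
  simp only [hany, Bool.false_eq_true, if_false]
  set D := (PySem.List.enumerate shards 0).foldl
      (fun d p => d.modify p.2 [] (fun l => l ++ [p.1])) PySem.Dict.empty with hD
  set out0 : List (Option (String × Int)) := List.replicate shards.length none with hout0
  set filled := D.items.foldl
      (fun o p => (PySem.List.enumerate p.2 0).foldl
        (fun o' q => PySem.List.pySetD o' q.2 (some (p.1, q.1))) o) out0 with hfilled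
  have hkeys : D.keys = PySem.Set.ofList shards := pos_keys shards
  have hnd : D.keys.Nodup := hkeys ▸ PySem.Set.nodup_ofList shards
  have hitems : D.items = D.keys.map (fun s => (s, occ shards s)) := by
    rw [PySem.Dict.items_eq_map_keys D hnd []]
    apply List.map_congr_left
    intro s _
    rw [pos_getD]
  have hfst : D.items.map Prod.fst = D.keys := rfl
  have hlen0 : out0.length = shards.length := by simp [hout0]
  have hlenF : filled.length = shards.length := by
    rw [hfilled, outerLen, hlen0]
  apply List.ext_getElem?
  intro j
  rw [List.getElem?_map, specFrom_getElem? shards [] j]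
  by_cases hj : j < shards.length
  · have hg := scatterGet shards j hj D.items out0
      (by rw [hfst]; exact hnd)
      (by
        intro p hp
        rw [hitems] at hp
        obtain ⟨s, _, rfl⟩ := List.mem_map.mp hp
        rfl)
      hlen0
    have hmem : shards[j] ∈ D.items.map Prod.fst := by
      rw [hfst, hkeys, PySem.Set.mem_ofList]
      exact List.getElem_mem hj
    rw [if_pos hmem, ← hfilled] at hg
    rw [PySem.List.pyGetD_natCast, List.getD_eq_getElem?_getD,
      List.getElem?_eq_getElem (by omega : j < filled.length)] at hg
    simp only [Option.getD_some] at hg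
    rw [List.getElem?_eq_getElem (by omega : j < filled.length), hg,
      List.getElem?_eq_getElem hj]
    simp
  · rw [List.getElem?_eq_none (by omega : filled.length ≤ j),
      List.getElem?_eq_none (by omega : shards.length ≤ j)]
    simp

-- ===== VERDICT (by name: the statement is the Claim_ definition above) =====
theorem shard_local_provenance_spec : Claim_equal_shard_local_provenance := by
  intro shards _ hpre
  unfold Spec_shard_local_provenance shard_local_provenance
  rw [alt_eq shards hpre]
  rw [shardGoA_eq shards [] PySem.Dict.empty []
    (fun s hs h => hpre (h ▸ hs)) (fun t => by simp [PySem.Dict.getD_empty])]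
  simp
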